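-- pv_equiv track=rewrite | github.com/SirRDragonbornKnight/Forge_AI | enigma_engine/utils/training_validator.py | convert_to_format
-- ===== SOURCE A (Python) =====
-- def convert_to_format(content: str, target_format: str = "qa") -> str:
--     """
--     Convert training data to a specific format.
--
--     Args:
--         content: Original content
--         target_format: Target format ('qa', 'conversation')
--
--     Returns:
--         Formatted content
--     """
--     lines = content.split('\n')
--     formatted = []
--
--     for line in lines:
--         line = line.strip()
--         if not line:
--             formatted.append('')
--             continue
--
--         # Detect current format and convert
--         if line.startswith('Q:'):
--             if target_format == 'conversation':
--                 formatted.append('User:' + line[2:])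
--             else:
--                 formatted.append(line)
--         elif line.startswith('A:'):
--             if target_format == 'conversation':
--                 formatted.append('AI:' + line[2:])
--             else:
--                 formatted.append(line)
--         elif line.startswith('User:'):
--             if target_format == 'qa':
--                 formatted.append('Q:' + line[5:])
--             else:
--                 formatted.append(line)
--         elif line.startswith('AI:') or line.startswith('Assistant:'):
--             if target_format == 'qa':
--                 formatted.append('A:' + line.split(':', 1)[1])
--             else:
--                 formatted.append('AI:' + line.split(':', 1)[1])
--         else:
--             formatted.append(line)
--
--     return '\n'.join(formatted)
-- ===== SOURCE B (Python) =====
-- def _tokenize(raw):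
--     # Stage 1: format-independent tokenization of one line into (kind, payload, original).
--     line = raw.strip()
--     if not line:
--         return ('blank', '', '')
--     if line.startswith('Q:'):
--         return ('q', line[2:], line)
--     if line.startswith('User:'):
--         return ('q', line[5:], line)
--     if line.startswith('AI:'):
--         return ('ai', line[3:], line)
--     if line.startswith('Assistant:'):
--         return ('ai', line[10:], line)
--     if line.startswith('A:'):
--         return ('a', line[2:], line)
--     return ('text', '', line)
--
--
-- def _render_qa(tok):
--     kind, payload, orig = tok
--     if kind == 'blank':
--         return ''
--     if kind == 'q':
--         return 'Q:' + payload
--     if kind in ('a', 'ai'):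
--         return 'A:' + payload
--     return orig
--
--
-- def _render_conversation(tok):
--     kind, payload, orig = tok
--     if kind == 'blank':
--         return ''
--     if kind == 'q':
--         return 'User:' + payload
--     if kind in ('a', 'ai'):
--         return 'AI:' + payload
--     return orig
--
--
-- def _render_passthrough(tok):
--     kind, payload, orig = tok
--     if kind == 'blank':
--         return ''
--     if kind == 'ai':
--         return 'AI:' + payload
--     return orig
--
--
-- def convert_to_format(content: str, target_format: str = "qa") -> str:
--     # Stage 1: parse every line into an intermediate representation.
--     tokens = [_tokenize(raw) for raw in content.split('\n')]
--     # Stage 2: serialize the IR with a format-specific renderer chosen once.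
--     if target_format == 'qa':
--         render = _render_qa
--     elif target_format == 'conversation':
--         render = _render_conversation
--     else:
--         render = _render_passthrough
--     return '\n'.join(render(tok) for tok in tokens)
-- ===== Notes on version B (the rewrite author's own statement) =====
-- stated objective: alternative
-- what changed: B is a two-stage parse/render pipeline: stage 1 tokenizes every line into a format-independent (kind, payload, original) IR, stage 2 serializes the whole token list with one of three format-specific renderers chosen once, instead of A's single fused loop whose every branch re-tests target_format and formats in place.
import Mathlib
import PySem

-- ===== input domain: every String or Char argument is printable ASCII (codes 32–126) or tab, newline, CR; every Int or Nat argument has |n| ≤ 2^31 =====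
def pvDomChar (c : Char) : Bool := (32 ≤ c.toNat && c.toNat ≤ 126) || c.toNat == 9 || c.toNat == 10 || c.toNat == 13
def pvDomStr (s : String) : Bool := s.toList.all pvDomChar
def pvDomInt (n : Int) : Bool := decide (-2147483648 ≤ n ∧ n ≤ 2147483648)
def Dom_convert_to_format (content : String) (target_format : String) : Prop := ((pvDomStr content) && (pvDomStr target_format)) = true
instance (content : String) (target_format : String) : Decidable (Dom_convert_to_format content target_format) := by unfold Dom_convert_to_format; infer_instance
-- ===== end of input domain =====

-- B is a two-stage parse/render pipeline (tokenize lines into a format-independent IR, then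
-- serialize with a renderer chosen once from target_format) instead of A's fused per-line
-- cascade with format tests inside every branch (objective: alternative, same cost).

-- ===== PORT A =====
def convert_to_format (content : String) (target_format : String) : String :=
  -- lines = content.split('\n')  (sep ≠ "", so split? is always `some`)
  let lines := (PySem.Str.split? content "\n").getD []
  let formatted := lines.foldl (fun formatted line =>
    let line := PySem.Str.strip line
    if line = "" then formatted ++ [""]
    else if PySem.Str.startswith line "Q:" then
      (if target_format = "conversation" then formatted ++ ["User:" ++ PySem.Str.slice line (some 2) none]
       else formatted ++ [line])
    else if PySem.Str.startswith line "A:" then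
      (if target_format = "conversation" then formatted ++ ["AI:" ++ PySem.Str.slice line (some 2) none]
       else formatted ++ [line])
    else if PySem.Str.startswith line "User:" then
      (if target_format = "qa" then formatted ++ ["Q:" ++ PySem.Str.slice line (some 5) none]
       else formatted ++ [line])
    else if PySem.Str.startswith line "AI:" || PySem.Str.startswith line "Assistant:" then
      -- line.split(':', 1)[1]: the guard guarantees a ':', so the split has a part [1];
      -- the `.getD` defaults are unreachable
      (if target_format = "qa" then formatted ++ ["A:" ++ ((PySem.Str.splitMax? line ":" 1).getD []).getD 1 ""]
       else formatted ++ ["AI:" ++ ((PySem.Str.splitMax? line ":" 1).getD []).getD 1 ""])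
    else formatted ++ [line]) []
  PySem.Str.join "\n" formatted

-- ===== PORT B =====
-- _tokenize's branch chain after the strip (factored so proofs can talk about stripped lines)
def pvTokBranch (line : String) : String × String × String :=
  if line = "" then ("blank", "", "")
  else if PySem.Str.startswith line "Q:" then ("q", PySem.Str.slice line (some 2) none, line)
  else if PySem.Str.startswith line "User:" then ("q", PySem.Str.slice line (some 5) none, line)
  else if PySem.Str.startswith line "AI:" then ("ai", PySem.Str.slice line (some 3) none, line)
  else if PySem.Str.startswith line "Assistant:" then ("ai", PySem.Str.slice line (some 10) none, line)
  else if PySem.Str.startswith line "A:" then ("a", PySem.Str.slice line (some 2) none, line)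
  else ("text", "", line)

def pvTokenize (raw : String) : String × String × String :=
  pvTokBranch (PySem.Str.strip raw)

def pvRenderQA (tok : String × String × String) : String :=
  if tok.1 = "blank" then ""
  else if tok.1 = "q" then "Q:" ++ tok.2.1
  else if tok.1 = "a" ∨ tok.1 = "ai" then "A:" ++ tok.2.1
  else tok.2.2

def pvRenderConversation (tok : String × String × String) : String :=
  if tok.1 = "blank" then ""
  else if tok.1 = "q" then "User:" ++ tok.2.1
  else if tok.1 = "a" ∨ tok.1 = "ai" then "AI:" ++ tok.2.1
  else tok.2.2

def pvRenderPassthrough (tok : String × String × String) : String :=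
  if tok.1 = "blank" then ""
  else if tok.1 = "ai" then "AI:" ++ tok.2.1
  else tok.2.2

def pvRenderFor (target_format : String) : String × String × String → String :=
  if target_format = "qa" then pvRenderQA
  else if target_format = "conversation" then pvRenderConversation
  else pvRenderPassthrough

def convert_to_format_alt (content : String) (target_format : String) : String :=
  let tokens := ((PySem.Str.split? content "\n").getD []).map pvTokenize
  let render := pvRenderFor target_format
  PySem.Str.join "\n" (tokens.map render)

-- ===== PRECONDITION & SPEC =====
def Spec_convert_to_format (content : String) (target_format : String) (out : String) : Prop := out = convert_to_format_alt content target_format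
instance (content : String) (target_format : String) (out : String) : Decidable (Spec_convert_to_format content target_format out) := by unfold Spec_convert_to_format; infer_instance

-- ===== CLAIM =====
def Claim_equal_convert_to_format : Prop := ∀ (content : String) (target_format : String), Dom_convert_to_format content target_format → Spec_convert_to_format content target_format (convert_to_format content target_format)

-- ===== LEMMAS AND PROOFS =====

-- A's per-line cascade, factored out of its loop body (proof-side helper)
def pvCascade (t s : String) : String :=
  if s = "" then ""
  else if PySem.Str.startswith s "Q:" then
    (if t = "conversation" then "User:" ++ PySem.Str.slice s (some 2) none else s)
  else if PySem.Str.startswith s "A:" then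
    (if t = "conversation" then "AI:" ++ PySem.Str.slice s (some 2) none else s)
  else if PySem.Str.startswith s "User:" then
    (if t = "qa" then "Q:" ++ PySem.Str.slice s (some 5) none else s)
  else if PySem.Str.startswith s "AI:" || PySem.Str.startswith s "Assistant:" then
    (if t = "qa" then "A:" ++ ((PySem.Str.splitMax? s ":" 1).getD []).getD 1 ""
     else "AI:" ++ ((PySem.Str.splitMax? s ":" 1).getD []).getD 1 "")
  else s

lemma pv_foldl_push {α β : Type} (g : α → β) :
    ∀ (l : List α) (acc : List β), l.foldl (fun acc x => acc ++ [g x]) acc = acc ++ l.map g := by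
  intro l
  induction l with
  | nil => intro acc; simp
  | cons h tl ih => intro acc; simp [ih]

lemma pv_sw_shape (L p : List Char) (h : PySem.Chars.startswith L p = true) :
    ∃ rest, L = p ++ rest := by
  rw [PySem.Chars.startswith_iff] at h
  rcases h with ⟨rest, hr⟩
  exact ⟨rest, hr.symm⟩

-- a p-prefixed string is not q-prefixed when p and q are prefix-incomparable
lemma pv_sw_false (L p q : List Char) (hp : PySem.Chars.startswith L p = true)
    (h : ¬(p <+: q ∨ q <+: p)) : PySem.Chars.startswith L q = false := by
  cases hq : PySem.Chars.startswith L q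
  · rfl
  · rw [PySem.Chars.startswith_iff] at hp hq
    exact (h (List.prefix_or_prefix_of_prefix hp hq)).elim

lemma pv_go_zero (sep : List Char) (fuel : Nat) (l cur : List Char) (acc : List (List Char)) :
    PySem.Chars.splitOnMax.go sep fuel 0 l cur acc = ((cur.reverse ++ l) :: acc).reverse := by
  cases fuel with
  | zero => simp [PySem.Chars.splitOnMax.go]
  | succ n => cases l with
    | nil => simp [PySem.Chars.splitOnMax.go]
    | cons c rest => simp [PySem.Chars.splitOnMax.go]

lemma pv_split_AI (s : String) (rest : List Char) (hs : s.toList = 'A' :: 'I' :: ':' :: rest) :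
    ((PySem.Str.splitMax? s ":" 1).getD [])[1]?.getD "" = String.ofList rest := by
  unfold PySem.Str.splitMax?
  rw [show (":" : String).toList = [':'] from rfl, hs]
  simp [PySem.Chars.splitMax?, PySem.Chars.splitOnMax, PySem.Chars.splitOnMax.go, pv_go_zero]

lemma pv_split_AS (s : String) (rest : List Char)
    (hs : s.toList = 'A' :: 's' :: 's' :: 'i' :: 's' :: 't' :: 'a' :: 'n' :: 't' :: ':' :: rest) :
    ((PySem.Str.splitMax? s ":" 1).getD [])[1]?.getD "" = String.ofList rest := by
  unfold PySem.Str.splitMax?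
  rw [show (":" : String).toList = [':'] from rfl, hs]
  simp [PySem.Chars.splitMax?, PySem.Chars.splitOnMax, PySem.Chars.splitOnMax.go, pv_go_zero]

lemma pv_slice_drop (s : String) (a : Int) (h : 0 ≤ a) :
    PySem.Str.slice s (some a) none = String.ofList (s.toList.drop a.toNat) := by
  unfold PySem.Str.slice
  rw [PySem.Chars.slice_eq_listSlice, PySem.List.slice_from _ h]

lemma pv_append_ofList (p : String) (l : List Char) :
    p ++ String.ofList l = String.ofList (p.toList ++ l) := by
  apply String.toList_injective
  simp

-- "pfx ++ s[|pfx|:] = s" when s starts with pfx — reassembly of the sliced payload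
lemma pv_reassemble (s pfx : String) (rest : List Char) (hs : s.toList = pfx.toList ++ rest) :
    pfx ++ PySem.Str.slice s (some (pfx.toList.length : Int)) none = s := by
  rw [pv_slice_drop s _ (by positivity), pv_append_ofList]
  rw [show pfx.toList ++ s.toList.drop (pfx.toList.length : Int).toNat = s.toList by
        rw [hs]; simp]
  exact String.ofList_toList

-- the core per-line equality: A's cascade = render of B's token
lemma pv_line_eq (t s : String) : pvCascade t s = pvRenderFor t (pvTokBranch s) := by
  by_cases h0 : s = ""
  · subst h0
    by_cases hc : t = "conversation" <;> by_cases hq : t = "qa" <;>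
      simp [pvCascade, pvRenderFor, pvRenderQA, pvRenderConversation, pvRenderPassthrough,
            pvTokBranch, hc, hq]
  by_cases hQ : PySem.Chars.startswith s.toList ['Q', ':'] = true
  · obtain ⟨rest, hs⟩ := pv_sw_shape _ _ hQ
    have heq : ("Q:" : String) ++ PySem.Str.slice s (some 2) none = s :=
      pv_reassemble s "Q:" rest hs
    by_cases hc : t = "conversation" <;> by_cases hq : t = "qa" <;>
      simp_all [pvCascade, pvRenderFor, pvRenderQA, pvRenderConversation, pvRenderPassthrough,
                pvTokBranch, PySem.Str.startswith]
  by_cases hA : PySem.Chars.startswith s.toList ['A', ':'] = true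
  · have hAI := pv_sw_false _ _ ['A', 'I', ':'] hA (by decide)
    have hAS := pv_sw_false _ _ ['A', 's', 's', 'i', 's', 't', 'a', 'n', 't', ':'] hA (by decide)
    have hU := pv_sw_false _ _ ['U', 's', 'e', 'r', ':'] hA (by decide)
    obtain ⟨rest, hs⟩ := pv_sw_shape _ _ hA
    have heq : ("A:" : String) ++ PySem.Str.slice s (some 2) none = s :=
      pv_reassemble s "A:" rest hs
    by_cases hc : t = "conversation" <;> by_cases hq : t = "qa" <;>
      simp_all [pvCascade, pvRenderFor, pvRenderQA, pvRenderConversation, pvRenderPassthrough,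
                pvTokBranch, PySem.Str.startswith]
  by_cases hU : PySem.Chars.startswith s.toList ['U', 's', 'e', 'r', ':'] = true
  · obtain ⟨rest, hs⟩ := pv_sw_shape _ _ hU
    have heq : ("User:" : String) ++ PySem.Str.slice s (some 5) none = s :=
      pv_reassemble s "User:" rest hs
    have hAI := pv_sw_false _ _ ['A', 'I', ':'] hU (by decide)
    have hAS := pv_sw_false _ _ ['A', 's', 's', 'i', 's', 't', 'a', 'n', 't', ':'] hU (by decide)
    by_cases hc : t = "conversation" <;> by_cases hq : t = "qa" <;>
      simp_all [pvCascade, pvRenderFor, pvRenderQA, pvRenderConversation, pvRenderPassthrough,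
                pvTokBranch, PySem.Str.startswith]
  by_cases hAI : PySem.Chars.startswith s.toList ['A', 'I', ':'] = true
  · obtain ⟨rest, hs⟩ := pv_sw_shape _ _ hAI
    simp only [List.cons_append, List.nil_append] at hs
    have hAS := pv_sw_false _ _ ['A', 's', 's', 'i', 's', 't', 'a', 'n', 't', ':'] hAI (by decide)
    have hsplit := pv_split_AI s rest hs
    have hslice : PySem.Str.slice s (some 3) none = String.ofList rest := by
      rw [pv_slice_drop s 3 (by norm_num), hs]; rfl
    by_cases hc : t = "conversation" <;> by_cases hq : t = "qa" <;>
      simp_all [pvCascade, pvRenderFor, pvRenderQA, pvRenderConversation, pvRenderPassthrough,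
                pvTokBranch, PySem.Str.startswith]
  by_cases hAS : PySem.Chars.startswith s.toList ['A', 's', 's', 'i', 's', 't', 'a', 'n', 't', ':'] = true
  · obtain ⟨rest, hs⟩ := pv_sw_shape _ _ hAS
    simp only [List.cons_append, List.nil_append] at hs
    have hsplit := pv_split_AS s rest hs
    have hslice : PySem.Str.slice s (some 10) none = String.ofList rest := by
      rw [pv_slice_drop s 10 (by norm_num), hs]; rfl
    by_cases hc : t = "conversation" <;> by_cases hq : t = "qa" <;>
      simp_all [pvCascade, pvRenderFor, pvRenderQA, pvRenderConversation, pvRenderPassthrough,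
                pvTokBranch, PySem.Str.startswith]
  · by_cases hc : t = "conversation" <;> by_cases hq : t = "qa" <;>
      simp_all [pvCascade, pvRenderFor, pvRenderQA, pvRenderConversation, pvRenderPassthrough,
                pvTokBranch, PySem.Str.startswith]

-- ===== VERDICT =====
theorem convert_to_format_spec : Claim_equal_convert_to_format := by
  intro content t _
  unfold Spec_convert_to_format
  simp only [convert_to_format, convert_to_format_alt, List.map_map]
  congr 1
  rw [← List.nil_append (List.map (pvRenderFor t ∘ pvTokenize) _),
      ← pv_foldl_push (pvRenderFor t ∘ pvTokenize)]
  apply List.foldl_ext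
  intro acc x _
  rw [show (pvRenderFor t ∘ pvTokenize) x = pvCascade t (PySem.Str.strip x) from
        (pv_line_eq t (PySem.Str.strip x)).symm]
  simp only [pvCascade]
  split_ifs <;> rfl
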